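-- pv_equiv track=rewrite | github.com/Mar1311/ATP2022 | TPC7/TPC7.py | alcurso
-- ===== SOURCE A (Python) =====
-- def alcurso(alunos):
--     dic = {}
--     for _,_,curso, *_ in alunos:
--         if curso in dic.keys():
--             dic[curso] += 1
--         else:
--             dic[curso] = 1
--     return dic
-- ===== SOURCE B (Python) =====
-- def alcurso(alunos):
--     cursos = [curso for _,_,curso, *_ in alunos]
--     return {curso: cursos.count(curso) for curso in cursos}
-- ===== Notes on version B (the rewrite author's own statement) =====
-- stated objective: alternative
-- what changed: Replaces A's single accumulating pass (dict lookup-and-increment per student) by first extracting the course list and then building the result with a count-per-key dict comprehension that rescans the list for each course.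
import Mathlib
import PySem

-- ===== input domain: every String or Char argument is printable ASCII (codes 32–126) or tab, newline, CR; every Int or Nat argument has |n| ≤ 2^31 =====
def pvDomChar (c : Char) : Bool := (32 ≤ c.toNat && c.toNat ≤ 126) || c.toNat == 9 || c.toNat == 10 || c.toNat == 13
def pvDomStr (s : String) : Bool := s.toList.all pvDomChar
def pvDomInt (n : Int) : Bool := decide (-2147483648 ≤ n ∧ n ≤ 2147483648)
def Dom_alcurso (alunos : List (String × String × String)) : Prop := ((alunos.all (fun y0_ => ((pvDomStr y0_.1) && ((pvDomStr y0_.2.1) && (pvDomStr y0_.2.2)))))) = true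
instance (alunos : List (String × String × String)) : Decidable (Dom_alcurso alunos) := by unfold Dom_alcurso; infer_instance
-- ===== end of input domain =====

-- B replaces A's single accumulating pass by extracting the course list and counting each course by rescanning it (alternative algorithm, same return value).


-- ===== PORT A =====
-- A: one pass, 'if curso in dic: dic[curso] += 1 else: dic[curso] = 1'
def alcurso (alunos : List (String × String × String)) : List (String × Int) :=
  (alunos.foldl (fun dic y =>
      if dic.contains y.2.2 then dic.modify y.2.2 0 (· + 1)
      else dic.insert y.2.2 1) PySem.Dict.empty).items

-- ===== PORT B =====
-- B: cursos = [curso for _,_,curso,*_ in alunos]; {c: cursos.count(c) for c in cursos}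
def alcurso_alt (alunos : List (String × String × String)) : List (String × Int) :=
  let cursos := alunos.map (fun y => y.2.2)
  (cursos.foldl (fun d c => d.insert c ((cursos.count c : Nat) : Int)) PySem.Dict.empty).items

-- ===== PRECONDITION & SPEC =====
def Spec_alcurso (alunos : List (String × String × String)) (out : List (String × Int)) : Prop := out = alcurso_alt alunos
instance (alunos : List (String × String × String)) (out : List (String × Int)) : Decidable (Spec_alcurso alunos out) := by unfold Spec_alcurso; infer_instance

-- ===== CLAIM (what is proved, stated in full; the proofs are below) =====
def Claim_equal_alcurso : Prop := ∀ (alunos : List (String × String × String)), Dom_alcurso alunos → Spec_alcurso alunos (alcurso alunos)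

-- ===== LEMMAS AND PROOFS =====

-- A's loop body is the standard counter step.
theorem alcurso_step (d : PySem.Dict String Int) (c : String) :
    (if d.contains c then d.modify c 0 (· + 1) else d.insert c 1) = d.insert c (d.getD c 0 + 1) := by
  split_ifs with h
  · simp [PySem.Dict.modify, PySem.Dict.insert, PySem.Dict.getD]
  · rw [PySem.Dict.getD_of_not_contains d 0 (by simpa using h)]; norm_num

-- A's dict is Counter(cursos).
theorem alcurso_eq_counter (alunos : List (String × String × String)) :
    alcurso alunos =
      ((PySem.Set.ofList (alunos.map (fun y => y.2.2))).map
        (fun k => (k, ((alunos.map (fun y => y.2.2)).count k : Int)))) := by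
  unfold alcurso
  have hf : (fun (dic : PySem.Dict String Int) (y : String × String × String) =>
      if dic.contains y.2.2 then dic.modify y.2.2 0 (· + 1) else dic.insert y.2.2 1)
      = fun d y => d.insert y.2.2 (d.getD y.2.2 0 + 1) := by
    funext d y; exact alcurso_step d y.2.2
  have h2 : alunos.foldl (fun d y => d.insert y.2.2 (d.getD y.2.2 0 + 1)) PySem.Dict.empty
      = (alunos.map (fun y => y.2.2)).foldl
          (fun (d : PySem.Dict String Int) x => d.insert x (d.getD x 0 + 1)) PySem.Dict.empty :=
    by rw [List.foldl_map]
  rw [hf, h2, PySem.Dict.foldl_insert_getD_add_one_eq_counter, PySem.Dict.items_counter]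

-- B's insert-only loop with a value that depends only on the key produces
-- the deduplicated keys in first-occurrence order, each paired with its value.
theorem foldl_insert_const (f : String → Int) (l : List String) :
    ((l.foldl (fun d c => d.insert c (f c)) PySem.Dict.empty).items)
      = (PySem.Set.ofList l).map (fun k => (k, f k)) := by
  induction l using List.reverseRecOn with
  | nil => rfl
  | append_singleton l a ih =>
    rw [List.foldl_append, List.foldl_cons, List.foldl_nil,
        PySem.Set.ofList_append_singleton, PySem.Dict.items_insert]
    have hkeys : (l.foldl (fun d c => d.insert c (f c)) PySem.Dict.empty).keys
        = PySem.Set.ofList l := by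
      rw [PySem.Dict.keys_foldl_insert (f := fun _ c => f c)]
      simp [PySem.Dict.keys_empty, PySem.Set.update_nil_left]
    by_cases hmem : a ∈ PySem.Set.ofList l
    · have hc : (l.foldl (fun d c => d.insert c (f c)) PySem.Dict.empty).contains a = true := by
        rw [PySem.Dict.contains_eq_decide_mem_keys, hkeys]; simpa using hmem
      rw [hc, if_pos rfl, ih, PySem.Set.add_of_mem hmem, List.map_map]
      refine List.map_congr_left ?_
      intro k _
      by_cases hk : k = a
      · subst hk; simp
      · simp [hk]
    · have hc : (l.foldl (fun d c => d.insert c (f c)) PySem.Dict.empty).contains a = false := by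
        rw [PySem.Dict.contains_eq_decide_mem_keys, hkeys]; simpa using hmem
      rw [hc, if_neg (by simp), ih, PySem.Set.add_of_not_mem hmem, List.map_append]
      rfl

-- ===== VERDICT (by name: the statement is the Claim_ definition above) =====
theorem alcurso_spec : Claim_equal_alcurso := by
  intro alunos _
  show alcurso alunos = alcurso_alt alunos
  rw [alcurso_eq_counter]
  unfold alcurso_alt
  rw [foldl_insert_const (f := fun c => ((alunos.map (fun y => y.2.2)).count c : Int))]
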